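-- pv_equiv track=rewrite | github.com/thealper2/codewars-solutions | 7-kyu/dice_rotation.py | count_min_rotations
-- ===== SOURCE A (Python) =====
-- def count_min_rotations(dice):
--     opposites = {1:6, 2:5, 3:4, 4:3, 5:2, 6:1}
--     min_rotations = float('inf')
--
--     for target in range(1, 7):
--         rotations = 0
--         for face in dice:
--             if face == target:
--                 continue
--             elif opposites[face] == target:
--                 rotations += 2
--             else:
--                 rotations += 1
--
--         if rotations < min_rotations:
--             min_rotations = rotations
--
--     return min_rotations
-- ===== SOURCE B (Python) =====
-- def count_min_rotations(dice):
--     opposites = {1: 6, 2: 5, 3: 4, 4: 3, 5: 2, 6: 1}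
--     counts = {}
--     for face in dice:
--         counts[face] = counts.get(face, 0) + 1
--     return min(
--         sum(cnt * (0 if face == target else 2 if opposites[face] == target else 1)
--             for face, cnt in counts.items())
--         for target in range(1, 7)
--     )
-- ===== Notes on version B (the rewrite author's own statement) =====
-- stated objective: alternative
-- what changed: B replaces A's 6 full passes over dice (cost counted face by face per target) with one counting pass and, per target, a weighted sum over the at most 6 distinct faces in the counter; the opposites[face] lookup is kept so out-of-range faces still raise KeyError.
import Mathlib
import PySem

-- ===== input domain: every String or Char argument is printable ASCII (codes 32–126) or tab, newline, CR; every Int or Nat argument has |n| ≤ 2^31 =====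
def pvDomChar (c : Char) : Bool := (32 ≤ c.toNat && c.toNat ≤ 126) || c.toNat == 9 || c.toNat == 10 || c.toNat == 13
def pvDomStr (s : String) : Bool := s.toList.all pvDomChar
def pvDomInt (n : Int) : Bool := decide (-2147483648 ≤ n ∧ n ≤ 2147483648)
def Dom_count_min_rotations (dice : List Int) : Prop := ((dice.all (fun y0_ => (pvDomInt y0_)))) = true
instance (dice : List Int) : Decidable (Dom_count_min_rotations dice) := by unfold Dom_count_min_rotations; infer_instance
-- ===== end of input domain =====

-- B replaces A's 6 full passes over dice with one counting pass and a per-target weighted sum over the counter; return values proved equal on Pre_.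

-- ===== PORT A =====
-- the opposites dict of A (and B)
def pvOpposites : PySem.Dict Int Int :=
  PySem.Dict.ofList [(1, 6), (2, 5), (3, 4), (4, 3), (5, 2), (6, 1)]

-- min_rotations = float('inf') is modelled as `none`; the final match's 0 branch is
-- unreachable since range(1,7) is nonempty. opposites[face] is total under Pre_ (getD's 0 is never used there).
def count_min_rotations (dice : List Int) : Int :=
  let acc := (PySem.List.pyRange 1 7 1).foldl
    (fun (minRot : Option Int) (target : Int) =>
      let rotations := dice.foldl
        (fun rot face =>
          if face = target then rot
          else if pvOpposites.getD face 0 = target then rot + 2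
          else rot + 1) 0
      match minRot with
      | none => some rotations
      | some m => if rotations < m then some rotations else some m) none
  match acc with
  | some m => m
  | none => 0

-- ===== PORT B =====
def count_min_rotations_alt (dice : List Int) : Int :=
  let counts := dice.foldl (fun d face => d.insert face (d.getD face 0 + 1)) PySem.Dict.empty
  let vals := (PySem.List.pyRange 1 7 1).map (fun target =>
    (counts.items.map (fun fc =>
      fc.2 * (if fc.1 = target then 0
              else if pvOpposites.getD fc.1 0 = target then 2
              else 1))).sum)
  -- min over the nonempty 6-element generator; [] branch unreachable.
  -- opposites[face] is total under Pre_ (getD's 0 is never used there).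
  match vals with
  | [] => 0
  | v :: vs => vs.foldl min v

-- ===== PRECONDITION & SPEC =====
-- Pre_ excludes exactly the inputs on which A raises KeyError: a face outside 1..6.
def Pre_count_min_rotations (dice : List Int) : Prop := ∀ x ∈ dice, 1 ≤ x ∧ x ≤ 6
instance (dice : List Int) : Decidable (Pre_count_min_rotations dice) := by
  unfold Pre_count_min_rotations; infer_instance

def pvWitness_count_min_rotations : List Int := [1, 3, 6, 3, 5]

def Spec_count_min_rotations (dice : List Int) (out : Int) : Prop := out = count_min_rotations_alt dice
instance (dice : List Int) (out : Int) : Decidable (Spec_count_min_rotations dice out) := by unfold Spec_count_min_rotations; infer_instance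

-- ===== CLAIM (what is proved, stated in full; the proofs are below) =====
def Claim_equal_count_min_rotations : Prop := ∀ (dice : List Int), Dom_count_min_rotations dice → Pre_count_min_rotations dice → Spec_count_min_rotations dice (count_min_rotations dice)

-- ===== LEMMAS AND PROOFS =====

-- A's inner loop for a target t ∈ 1..6 counts init + n - (#faces = t) + (#faces = 7 - t).
theorem rotA_eq (t : Int) (ht : 1 ≤ t ∧ t ≤ 6) (dice : List Int)
    (hp : ∀ x ∈ dice, 1 ≤ x ∧ x ≤ 6) (init : Int) :
    dice.foldl
      (fun rot face =>
        if face = t then rot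
        else if pvOpposites.getD face 0 = t then rot + 2
        else rot + 1) init
    = init + (dice.length : Int) - (dice.count t : Int) + (dice.count (7 - t) : Int) := by
  induction dice generalizing init with
  | nil => simp
  | cons f rest ih =>
    have hf := hp f (by simp)
    have hrest : ∀ x ∈ rest, 1 ≤ x ∧ x ≤ 6 := fun x hx => hp x (by simp [hx])
    have hopp : pvOpposites.getD f 0 = 7 - f := by
      obtain ⟨h1, h2⟩ := hf
      interval_cases f <;> decide
    simp only [List.foldl_cons, List.count_cons, hopp]
    split_ifs <;> rw [ih hrest] <;>
      simp only [beq_iff_eq, List.length_cons] at * <;> push_cast <;> omega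

-- A's running-minimum loop over the remaining targets, once the accumulator is `some m`.
theorem foldA_min (f : Int → Int) (ts : List Int) (m : Int) :
    List.foldl (fun (mr : Option Int) t =>
      match mr with
      | none => some (f t)
      | some m => if f t < m then some (f t) else some m) (some m) ts
    = some (ts.foldl (fun m t => min m (f t)) m) := by
  induction ts generalizing m with
  | nil => rfl
  | cons t ts ih =>
    simp only [List.foldl_cons]
    have h : (if f t < m then some (f t) else some m) = some (min m (f t)) := by
      split_ifs with h <;> simp [min_def] <;> omega
    rw [h, ih]

-- the same loop started at `none`, one step unrolled
theorem foldA_min_cons (f : Int → Int) (t : Int) (ts : List Int) :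
    List.foldl (fun (mr : Option Int) t =>
      match mr with
      | none => some (f t)
      | some m => if f t < m then some (f t) else some m) none (t :: ts)
    = some (ts.foldl (fun m t => min m (f t)) (f t)) := by
  rw [List.foldl_cons]
  exact foldA_min f ts (f t)

-- B's weighted sum over the counter's items is the plain sum over dice.
theorem sum_support (g : Int → Int) (dice : List Int) :
    (((PySem.Set.ofList dice).map (fun k => (k, (dice.count k : Int)))).map
      (fun fc => fc.2 * g fc.1)).sum = (dice.map g).sum := by
  rw [List.map_map]
  rw [Finset.sum_list_map_count dice g]
  rw [← List.sum_toFinset _ (PySem.Set.nodup_ofList dice)]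
  have h : (PySem.Set.ofList dice).toFinset = dice.toFinset := by
    ext x; simp [PySem.Set.mem_ofList]
  rw [h]
  apply Finset.sum_congr rfl
  intro m _
  simp

-- the per-face cost summed over dice, in closed form (the same derivation as rotA_eq).
theorem sum_cost (t : Int) (ht : 1 ≤ t ∧ t ≤ 6) (dice : List Int)
    (hp : ∀ x ∈ dice, 1 ≤ x ∧ x ≤ 6) :
    (dice.map (fun f => if f = t then (0 : Int)
                        else if pvOpposites.getD f 0 = t then 2
                        else 1)).sum
    = (dice.length : Int) - (dice.count t : Int) + (dice.count (7 - t) : Int) := by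
  induction dice with
  | nil => simp
  | cons f rest ih =>
    have hf := hp f (by simp)
    have hrest : ∀ x ∈ rest, 1 ≤ x ∧ x ≤ 6 := fun x hx => hp x (by simp [hx])
    have hopp : pvOpposites.getD f 0 = 7 - f := by
      obtain ⟨h1, h2⟩ := hf
      interval_cases f <;> decide
    simp only [List.map_cons, List.sum_cons, List.count_cons, hopp]
    split_ifs <;> rw [ih hrest] <;>
      simp only [beq_iff_eq, List.length_cons] at * <;> push_cast <;> omega

-- ===== VERDICT (by name: the statement is the Claim_ definition above) =====
theorem count_min_rotations_spec : Claim_equal_count_min_rotations := by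
  intro dice _ hp
  unfold Spec_count_min_rotations count_min_rotations count_min_rotations_alt
  have hrange : PySem.List.pyRange 1 7 1 = [1, 2, 3, 4, 5, 6] := by decide
  have hr : ∀ t, 1 ≤ t ∧ t ≤ 6 → dice.foldl
      (fun rot face =>
        if face = t then rot
        else if pvOpposites.getD face 0 = t then rot + 2
        else rot + 1) 0
      = (dice.length : Int) - (dice.count t : Int) + (dice.count (7 - t) : Int) := by
    intro t ht
    rw [rotA_eq t ht dice hp 0]; ring
  have hb : ∀ t, 1 ≤ t ∧ t ≤ 6 →
      (((dice.foldl (fun d face => d.insert face (d.getD face 0 + 1))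
          PySem.Dict.empty).items).map
        (fun fc => fc.2 * (if fc.1 = t then (0 : Int)
                           else if pvOpposites.getD fc.1 0 = t then 2
                           else 1))).sum
      = (dice.length : Int) - (dice.count t : Int) + (dice.count (7 - t) : Int) := by
    intro t ht
    rw [PySem.Dict.foldl_insert_getD_add_one_eq_counter, PySem.Dict.items_counter,
        sum_support (fun f => if f = t then (0 : Int)
                              else if pvOpposites.getD f 0 = t then 2
                              else 1) dice]
    exact sum_cost t ht dice hp
  simp only [hrange, List.map_cons, List.map_nil]
  rw [foldA_min_cons (fun target => dice.foldl
        (fun rot face =>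
          if face = target then rot
          else if pvOpposites.getD face 0 = target then rot + 2
          else rot + 1) 0) 1 [2, 3, 4, 5, 6]]
  simp only [List.foldl_cons, List.foldl_nil]
  rw [hr 1 (by omega), hr 2 (by omega), hr 3 (by omega), hr 4 (by omega),
      hr 5 (by omega), hr 6 (by omega),
      hb 1 (by omega), hb 2 (by omega), hb 3 (by omega), hb 4 (by omega),
      hb 5 (by omega), hb 6 (by omega)]
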